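-- pv_equiv track=rewrite | github.com/r4wd3r/llms-are-acd | CybORG/Agents/LLMAgents/comm_vector/CommVectorGenerator.py | _check_files
-- ===== SOURCE A (Python) =====
-- def _check_files(file_events: dict) -> int:
--     '''
--     Checks if a file is created in the event. Currently, these are the only possible values for CAGE 4:
--     - cmd.{extension} is a user-level compromise
--     - escalate.{extension} is an admin-level compromise
--
--     param: file_events: dict - the events to check
--
--     return: int - 0 if no indicator of compromise, 1 if user compromise, 2 if admin compromise
--     '''
--     compromise_level = 0
--     ioc_files_user = ['cmd.sh', 'cmd.exe']
--     ioc_files_admin = ['escalate.sh', 'escalate.exe']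
--     for file in file_events:
--         if file['File Name'] in ioc_files_admin:
--             compromise_level = 3
--             break
--         if file['File Name'] in ioc_files_user:
--             compromise_level = 2
--     return compromise_level
-- ===== SOURCE B (Python) =====
-- def _check_files(file_events: dict) -> int:
--     '''Classify compromise level from file event names: 3 admin, 2 user, 0 none.'''
--     if any(f['File Name'] in ('escalate.sh', 'escalate.exe') for f in file_events):
--         return 3
--     if any(f['File Name'] in ('cmd.sh', 'cmd.exe') for f in file_events):
--         return 2
--     return 0
-- ===== Notes on version B (the rewrite author's own statement) =====
-- stated objective: idiomatic
-- what changed: Replaces the single stateful loop with a break and an accumulator by two short-circuiting any() scans (admin first, then user) with direct returns.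
import Mathlib
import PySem

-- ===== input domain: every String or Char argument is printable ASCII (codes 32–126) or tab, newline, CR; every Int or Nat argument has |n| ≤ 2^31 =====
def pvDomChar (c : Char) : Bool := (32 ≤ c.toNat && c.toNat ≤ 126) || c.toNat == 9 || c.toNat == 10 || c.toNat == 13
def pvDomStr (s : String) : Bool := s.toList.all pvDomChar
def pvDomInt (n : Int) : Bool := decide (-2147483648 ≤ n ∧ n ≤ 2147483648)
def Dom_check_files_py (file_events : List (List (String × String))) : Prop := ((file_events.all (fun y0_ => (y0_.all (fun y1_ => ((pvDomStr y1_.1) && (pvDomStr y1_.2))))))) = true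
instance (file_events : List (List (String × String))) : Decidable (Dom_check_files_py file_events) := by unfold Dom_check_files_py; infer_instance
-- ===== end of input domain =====

-- B replaces A's single stateful loop (accumulator + break) by two short-circuiting
-- membership scans with direct returns; same values (3 admin, 2 user, 0 none).

-- ===== PORT A =====
-- file['File Name'] : first-match lookup in the event's association list (KeyError → none, excluded by Pre_; the port reads "" there, a name matching no IOC)
def pvFileName (f : List (String × String)) : String :=
  (PySem.Dict.mk f).getD "File Name" ""

-- the for-loop of A: state = compromise_level, 'break' = returning immediately
def checkFilesLoop : List (List (String × String)) → Int → Int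
  | [], lvl => lvl
  | f :: rest, lvl =>
    if pvFileName f ∈ ["escalate.sh", "escalate.exe"] then 3
    else if pvFileName f ∈ ["cmd.sh", "cmd.exe"] then checkFilesLoop rest 2
    else checkFilesLoop rest lvl

def check_files_py (file_events : List (List (String × String))) : Int :=
  checkFilesLoop file_events 0

-- ===== PORT B =====
def check_files_py_alt (file_events : List (List (String × String))) : Int :=
  if file_events.any (fun f => pvFileName f == "escalate.sh" || pvFileName f == "escalate.exe") then 3
  else if file_events.any (fun f => pvFileName f == "cmd.sh" || pvFileName f == "cmd.exe") then 2
  else 0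

-- ===== PRECONDITION & SPEC =====
-- Python A raises KeyError at the first event without a 'File Name' key, unless an
-- earlier event's name is an admin IOC (the break stops the loop first); B raises there too.
def preOk : List (List (String × String)) → Bool
  | [] => true
  | f :: rest =>
    ((PySem.Dict.mk f).get? "File Name").isSome &&
      (pvFileName f ∈ ["escalate.sh", "escalate.exe"] || preOk rest)

def Pre_check_files_py (file_events : List (List (String × String))) : Prop :=
  preOk file_events = true
instance (file_events : List (List (String × String))) : Decidable (Pre_check_files_py file_events) := by unfold Pre_check_files_py; infer_instance

def pvWitness_check_files_py : (List (List (String × String))) :=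
  ([[("File Name", "cmd.sh")], [("File Name", "notes.txt")]])

def Spec_check_files_py (file_events : List (List (String × String))) (out : Int) : Prop := out = check_files_py_alt file_events
instance (file_events : List (List (String × String))) (out : Int) : Decidable (Spec_check_files_py file_events out) := by unfold Spec_check_files_py; infer_instance

-- ===== CLAIM (what is proved, stated in full; the proofs are below) =====
def Claim_equal_check_files_py : Prop := ∀ (file_events : List (List (String × String))), Dom_check_files_py file_events → Pre_check_files_py file_events → Spec_check_files_py file_events (check_files_py file_events)

-- ===== LEMMAS AND PROOFS =====
def isAdminEv (f : List (String × String)) : Bool :=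
  pvFileName f == "escalate.sh" || pvFileName f == "escalate.exe"
def isUserEv (f : List (String × String)) : Bool :=
  pvFileName f == "cmd.sh" || pvFileName f == "cmd.exe"

lemma checkFilesLoop_eq (fs : List (List (String × String))) (lvl : Int) :
    checkFilesLoop fs lvl =
      if fs.any isAdminEv then 3 else if fs.any isUserEv then 2 else lvl := by
  induction fs generalizing lvl with
  | nil => simp [checkFilesLoop]
  | cons f rest ih =>
    simp only [checkFilesLoop, List.any_cons]
    by_cases hA : isAdminEv f = true
    · have : pvFileName f ∈ ["escalate.sh", "escalate.exe"] := by
        simp [isAdminEv] at hA; simp [hA]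
      simp [this, hA]
    · have hA' : ¬ pvFileName f ∈ ["escalate.sh", "escalate.exe"] := by
        simp [isAdminEv] at hA; simp [hA]
      by_cases hU : isUserEv f = true
      · have : pvFileName f ∈ ["cmd.sh", "cmd.exe"] := by
          simp [isUserEv] at hU; simp [hU]
        rw [if_neg hA', if_pos this, ih]
        simp [hA, hU]
      · have hU' : ¬ pvFileName f ∈ ["cmd.sh", "cmd.exe"] := by
          simp [isUserEv] at hU; simp [hU]
        rw [if_neg hA', if_neg hU', ih]
        simp [hA, hU]

-- ===== VERDICT (by name: the statement is the Claim_ definition above) =====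
theorem check_files_py_spec : Claim_equal_check_files_py := by
  intro fs _ _
  show checkFilesLoop fs 0 = check_files_py_alt fs
  rw [checkFilesLoop_eq]
  simp [check_files_py_alt, isAdminEv, isUserEv]
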